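-- pv_equiv track=rewrite | github.com/pollyyordanova/Programming-Fundamentals-with-Python | text_processing_exercise/character_multiplier.py | character_multiplier
-- ===== SOURCE A (Python) =====
-- def character_multiplier(str1, str2):
--     total_sum = 0
--     for i in range(min(len(str1), len(str2))):
--         total_sum += ord(str1[i]) * ord(str2[i])
--     if len(str1) > len(str2):
--         total_sum += sum(ord(ch) for ch in str1[len(str2):])
--     elif len(str2) > len(str1):
--         total_sum += sum(ord(ch) for ch in str2[len(str1):])
--     return total_sum
-- ===== SOURCE B (Python) =====
-- def character_multiplier(str1, str2):
--     n = max(len(str1), len(str2))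
--     s1 = str1.ljust(n, chr(1))
--     s2 = str2.ljust(n, chr(1))
--     return sum(ord(a) * ord(b) for a, b in zip(s1, s2))
-- ===== Notes on version B (the rewrite author's own statement) =====
-- stated objective: simpler
-- what changed: Instead of an index loop over the common prefix plus length-comparison branches summing the leftover slice, B pads both strings to equal length with chr(1) (ord 1, a multiplicative identity) and sums ord products over a single zip, eliminating all branching and slicing.
import Mathlib
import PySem

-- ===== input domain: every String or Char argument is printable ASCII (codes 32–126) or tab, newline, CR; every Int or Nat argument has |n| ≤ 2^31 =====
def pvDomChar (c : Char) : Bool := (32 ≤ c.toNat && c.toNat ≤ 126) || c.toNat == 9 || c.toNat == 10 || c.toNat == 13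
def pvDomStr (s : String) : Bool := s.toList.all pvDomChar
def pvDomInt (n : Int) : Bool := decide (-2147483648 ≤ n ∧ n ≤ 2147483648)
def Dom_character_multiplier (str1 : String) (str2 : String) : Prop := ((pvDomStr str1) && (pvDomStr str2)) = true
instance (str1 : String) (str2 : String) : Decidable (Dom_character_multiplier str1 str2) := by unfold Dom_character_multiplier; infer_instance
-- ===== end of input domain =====

-- B pads both strings to equal length with chr(1) (a multiplicative identity for ord) and sums
-- ord products over one zip, removing A's index loop, length branches and leftover-slice sums.

-- ===== PORT A =====
-- index loop over range(min(len,len)), then a branch adding the leftover slice's char codes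
def character_multiplier (str1 : String) (str2 : String) : Int :=
  let l1 := str1.toList
  let l2 := str2.toList
  let total_sum : Int :=
    (PySem.List.pyRange 0 (min l1.length l2.length : Nat) 1).foldl
      (fun acc i =>
        acc + ((PySem.List.pyGetD l1 i ' ').toNat : Int) * ((PySem.List.pyGetD l2 i ' ').toNat : Int)) 0
  if l1.length > l2.length then
    total_sum + ((PySem.List.slice l1 (some (l2.length : Int)) none).map (fun c => (c.toNat : Int))).sum
  else if l2.length > l1.length then
    total_sum + ((PySem.List.slice l2 (some (l1.length : Int)) none).map (fun c => (c.toNat : Int))).sum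
  else
    total_sum

-- ===== PORT B =====
-- pad both to the max length with chr(1) (ljust), then one zip-and-sum
def character_multiplier_alt (str1 : String) (str2 : String) : Int :=
  let l1 := str1.toList
  let l2 := str2.toList
  let n := max l1.length l2.length
  let s1 := l1 ++ List.replicate (n - l1.length) (Char.ofNat 1)
  let s2 := l2 ++ List.replicate (n - l2.length) (Char.ofNat 1)
  ((s1.zip s2).map (fun ab => ((ab.1.toNat : Int) * (ab.2.toNat : Int)))).sum

-- ===== PRECONDITION & SPEC =====
def Spec_character_multiplier (str1 : String) (str2 : String) (out : Int) : Prop := out = character_multiplier_alt str1 str2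
instance (str1 : String) (str2 : String) (out : Int) : Decidable (Spec_character_multiplier str1 str2 out) := by unfold Spec_character_multiplier; infer_instance

-- ===== CLAIM (what is proved, stated in full; the proofs are below) =====
def Claim_equal_character_multiplier : Prop := ∀ (str1 : String) (str2 : String), Dom_character_multiplier str1 str2 → Spec_character_multiplier str1 str2 (character_multiplier str1 str2)

-- ===== LEMMAS AND PROOFS =====

-- zipping a list against an equal-length replicate of chr(1) and summing ord products sums char codes
theorem pv_zip_replicate_left (l : List Char) :
    ((((List.replicate l.length (Char.ofNat 1)).zip l).map
        (fun ab => ((ab.1.toNat : Int) * (ab.2.toNat : Int)))).sum)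
      = (l.map (fun c => (c.toNat : Int))).sum := by
  induction l with
  | nil => simp
  | cons b bs ih => simp [List.replicate_succ, ih]

theorem pv_zip_replicate_right (l : List Char) :
    (((l.zip (List.replicate l.length (Char.ofNat 1))).map
        (fun ab => ((ab.1.toNat : Int) * (ab.2.toNat : Int)))).sum)
      = (l.map (fun c => (c.toNat : Int))).sum := by
  induction l with
  | nil => simp
  | cons b bs ih => simp [List.replicate_succ, ih]

-- B's padded zip-sum splits into the common-prefix zip-sum plus both leftover char-code sums
theorem pv_alt_split (l1 l2 : List Char) :
    (((l1 ++ List.replicate (max l1.length l2.length - l1.length) (Char.ofNat 1)).zip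
        (l2 ++ List.replicate (max l1.length l2.length - l2.length) (Char.ofNat 1))).map
        (fun ab => ((ab.1.toNat : Int) * (ab.2.toNat : Int)))).sum
      = ((l1.zip l2).map (fun ab => ((ab.1.toNat : Int) * (ab.2.toNat : Int)))).sum
        + ((l1.drop l2.length).map (fun c => (c.toNat : Int))).sum
        + ((l2.drop l1.length).map (fun c => (c.toNat : Int))).sum := by
  induction l1 generalizing l2 with
  | nil =>
    simpa using pv_zip_replicate_left l2
  | cons a as ih =>
    cases l2 with
    | nil =>
      simpa using pv_zip_replicate_right (a :: as)
    | cons b bs =>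
      have h1 : max (as.length + 1) (bs.length + 1) - (as.length + 1)
          = max as.length bs.length - as.length := by omega
      have h2 : max (as.length + 1) (bs.length + 1) - (bs.length + 1)
          = max as.length bs.length - bs.length := by omega
      simp only [h1, h2, List.cons_append, List.zip_cons_cons, List.map_cons, List.sum_cons,
        List.length_cons, List.drop_succ_cons]
      rw [ih bs]
      ring

-- A's index loop over the common prefix equals the zip-sum
theorem pv_loop_eq (l1 l2 : List Char) :
    (PySem.List.pyRange 0 (min l1.length l2.length : Nat) 1).foldl
      (fun acc i =>
        acc + ((PySem.List.pyGetD l1 i ' ').toNat : Int) * ((PySem.List.pyGetD l2 i ' ').toNat : Int)) 0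
      = ((l1.zip l2).map (fun ab => ((ab.1.toNat : Int) * (ab.2.toNat : Int)))).sum := by
  have hlen : ((min l1.length l2.length : Nat) : Int) = ((l1.zip l2).length : Int) := by
    simp [List.length_zip]
  have hcongr :
      (PySem.List.pyRange 0 (min l1.length l2.length : Nat) 1).foldl
        (fun acc i =>
          acc + ((PySem.List.pyGetD l1 i ' ').toNat : Int) * ((PySem.List.pyGetD l2 i ' ').toNat : Int)) 0
      = (PySem.List.pyRange 0 (min l1.length l2.length : Nat) 1).foldl
        (fun acc i =>
          acc + (((PySem.List.pyGetD (l1.zip l2) i (' ', ' ')).1.toNat : Int)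
                  * ((PySem.List.pyGetD (l1.zip l2) i (' ', ' ')).2.toNat : Int))) 0 := by
    apply PySem.List.foldl_congr_mem
    intro acc i hi
    rw [PySem.List.mem_pyRange_one] at hi
    obtain ⟨h0, hlt⟩ := hi
    push_cast at hlt
    have hm1 : i < (l1.length : Int) := by omega
    have hm2 : i < (l2.length : Int) := by omega
    have hmz : i < ((l1.zip l2).length : Int) := by
      rw [List.length_zip]; push_cast; omega
    rw [PySem.List.pyGetD_eq_getElem l1 ' ' h0 hm1, PySem.List.pyGetD_eq_getElem l2 ' ' h0 hm2,
      PySem.List.pyGetD_eq_getElem (l1.zip l2) (' ', ' ') h0 hmz, List.getElem_zip]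
  rw [hcongr, hlen,
    PySem.List.foldl_pyRange_zero_pyGetD' (l1.zip l2) (' ', ' ')
      (fun acc p => acc + ((p.1.toNat : Int) * (p.2.toNat : Int))) 0,
    PySem.List.foldl_add (l1.zip l2) (fun p => ((p.1.toNat : Int) * (p.2.toNat : Int))) 0]
  simp

-- ===== VERDICT (by name: the statement is the Claim_ definition above) =====
theorem character_multiplier_spec : Claim_equal_character_multiplier := by
  intro str1 str2 _
  unfold Spec_character_multiplier
  show character_multiplier str1 str2 = character_multiplier_alt str1 str2
  simp only [character_multiplier, character_multiplier_alt]
  rw [pv_loop_eq str1.toList str2.toList, pv_alt_split str1.toList str2.toList,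
    PySem.List.slice_from_natCast str1.toList str2.toList.length,
    PySem.List.slice_from_natCast str2.toList str1.toList.length]
  set l1 := str1.toList
  set l2 := str2.toList
  split_ifs with hgt hlt
  · have : l2.drop l1.length = [] := List.drop_eq_nil_of_le (by omega)
    rw [this]; simp
  · have : l1.drop l2.length = [] := List.drop_eq_nil_of_le (by omega)
    rw [this]; simp
  · have e1 : l1.drop l2.length = [] := List.drop_eq_nil_of_le (by omega)
    have e2 : l2.drop l1.length = [] := List.drop_eq_nil_of_le (by omega)
    rw [e1, e2]; simp
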